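-- pv_equiv track=rewrite | github.com/jtovar43/CYBER_262_IA-2 | Assignment 2.py | getReadEvents
-- ===== SOURCE A (Python) =====
-- def getReadEvents(content):
--     fileCount = 0
--     keyCount = 0
--     pipeCount = 0
--     for line in content:
--         if "read" in line and "tty" not in line and "pipe" not in line:
--             fileCount += 1
--         if "read" in line and 'tty' in line:
--             keyCount += 1
--         if "read" in line and 'pipe' in line:
--             pipeCount += 1
--     readEvents = [fileCount, keyCount, pipeCount]
--     return readEvents
-- ===== SOURCE B (Python) =====
-- def getReadEvents(content):
--     reads = [line for line in content if "read" in line]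
--     fileCount = sum(1 for l in reads if "tty" not in l and "pipe" not in l)
--     keyCount = sum(1 for l in reads if "tty" in l)
--     pipeCount = sum(1 for l in reads if "pipe" in l)
--     return [fileCount, keyCount, pipeCount]
-- ===== Notes on version B (the rewrite author's own statement) =====
-- stated objective: simpler
-- what changed: Replaces the single interleaved counting loop with three explicit counters by a pre-filter of the 'read' lines followed by three independent sum-comprehension counts.
import Mathlib
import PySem

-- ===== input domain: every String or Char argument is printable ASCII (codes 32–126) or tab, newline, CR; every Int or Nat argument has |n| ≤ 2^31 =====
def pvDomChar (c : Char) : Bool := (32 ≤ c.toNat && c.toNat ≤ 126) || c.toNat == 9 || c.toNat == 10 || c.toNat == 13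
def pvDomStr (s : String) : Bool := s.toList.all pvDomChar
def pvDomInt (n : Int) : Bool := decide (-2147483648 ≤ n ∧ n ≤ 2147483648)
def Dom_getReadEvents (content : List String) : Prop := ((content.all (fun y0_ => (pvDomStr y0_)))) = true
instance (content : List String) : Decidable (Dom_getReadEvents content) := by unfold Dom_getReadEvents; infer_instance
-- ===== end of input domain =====

-- B replaces A's single interleaved counting loop by a pre-filter of the "read" lines
-- followed by three independent counts (objective: simpler).

-- ===== PORT A =====
def getReadEvents (content : List String) : List Int :=
  let st := content.foldl
    (fun (acc : Int × Int × Int) line =>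
      let acc :=
        if PySem.Str.isIn "read" line && !(PySem.Str.isIn "tty" line) && !(PySem.Str.isIn "pipe" line)
        then (acc.1 + 1, acc.2.1, acc.2.2) else acc
      let acc :=
        if PySem.Str.isIn "read" line && PySem.Str.isIn "tty" line
        then (acc.1, acc.2.1 + 1, acc.2.2) else acc
      if PySem.Str.isIn "read" line && PySem.Str.isIn "pipe" line
      then (acc.1, acc.2.1, acc.2.2 + 1) else acc)
    (0, 0, 0)
  [st.1, st.2.1, st.2.2]

-- ===== PORT B =====
def getReadEvents_alt (content : List String) : List Int :=
  let reads := content.filter (fun line => PySem.Str.isIn "read" line)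
  let fileCount : Int := reads.foldl (fun s l =>
    if !(PySem.Str.isIn "tty" l) && !(PySem.Str.isIn "pipe" l) then s + 1 else s) 0
  let keyCount : Int := reads.foldl (fun s l =>
    if PySem.Str.isIn "tty" l then s + 1 else s) 0
  let pipeCount : Int := reads.foldl (fun s l =>
    if PySem.Str.isIn "pipe" l then s + 1 else s) 0
  [fileCount, keyCount, pipeCount]

-- ===== PRECONDITION & SPEC =====
def Spec_getReadEvents (content : List String) (out : List Int) : Prop := out = getReadEvents_alt content
instance (content : List String) (out : List Int) : Decidable (Spec_getReadEvents content out) := by unfold Spec_getReadEvents; infer_instance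

-- ===== CLAIM (what is proved, stated in full; the proofs are below) =====
def Claim_equal_getReadEvents : Prop := ∀ (content : List String), Dom_getReadEvents content → Spec_getReadEvents content (getReadEvents content)

-- ===== LEMMAS AND PROOFS =====

-- The combined state of A's loop equals B's three independent counters, proved
-- abstractly over the three membership tests by induction from the right.
theorem triple_fold (p q r : String → Bool) (xs : List String) :
    xs.foldl
      (fun (acc : Int × Int × Int) line =>
        let acc := if p line && !(q line) && !(r line)
          then (acc.1 + 1, acc.2.1, acc.2.2) else acc
        let acc := if p line && q line
          then (acc.1, acc.2.1 + 1, acc.2.2) else acc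
        if p line && r line
        then (acc.1, acc.2.1, acc.2.2 + 1) else acc)
      (0, 0, 0)
    = ((xs.filter p).foldl (fun s l => if !(q l) && !(r l) then s + 1 else s) 0,
       (xs.filter p).foldl (fun s l => if q l then s + 1 else s) 0,
       (xs.filter p).foldl (fun s l => if r l then s + 1 else s) 0) := by
  induction xs using List.reverseRecOn with
  | nil => rfl
  | append_singleton xs x ih =>
    simp only [List.foldl_append, List.filter_append, List.foldl_cons, List.foldl_nil,
      List.filter_cons, List.filter_nil, ih]
    by_cases hp : p x = true <;> by_cases hq : q x = true <;> by_cases hr : r x = true <;>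
      simp [hp, hq, hr]

-- ===== VERDICT (by name: the statement is the Claim_ definition above) =====
theorem getReadEvents_spec : Claim_equal_getReadEvents := by
  intro content _
  show _ = _
  simp only [getReadEvents, getReadEvents_alt,
    triple_fold (fun line => PySem.Str.isIn "read" line)
      (fun line => PySem.Str.isIn "tty" line) (fun line => PySem.Str.isIn "pipe" line)]
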